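-- pv_equiv track=rewrite | github.com/deeprave/mcp-guide | src/mcp_guide/uri_parser.py | _resolve_command
-- ===== SOURCE A (Python) =====
-- def _resolve_command(path_segments: list[str], command_names: list[str]) -> tuple[str | None, list[str]]:
--     """Resolve longest matching command path, return (command_path, remaining_args).
--
--     Returns (None, path_segments) when command_names is empty.
--     """
--     if not command_names:
--         return None, path_segments
--     for i in range(len(path_segments), 0, -1):
--         candidate = "/".join(path_segments[:i])
--         if candidate in command_names:
--             return candidate, path_segments[i:]
--     # No match — use first segment as command, rest as args
--     return path_segments[0], path_segments[1:]
-- ===== SOURCE B (Python) =====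
-- def _resolve_command(path_segments: list[str], command_names: list[str]) -> tuple[str | None, list[str]]:
--     """Resolve longest matching command path, return (command_path, remaining_args).
--
--     Single forward pass: extend the joined prefix incrementally and remember the
--     longest prefix found in a set built from command_names.
--     """
--     if not command_names:
--         return None, path_segments
--     names = set(command_names)
--     best = None
--     prefix = ""
--     for i, seg in enumerate(path_segments):
--         prefix = seg if i == 0 else prefix + "/" + seg
--         if prefix in names:
--             best = (i + 1, prefix)
--     if best is not None:
--         return best[1], path_segments[best[0]:]
--     return path_segments[0], path_segments[1:]
-- ===== Notes on version B (the rewrite author's own statement) =====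
-- stated objective: faster
-- what changed: Replaces the backward scan that re-joins a growing slice and rescans the command list at every index with a single forward pass that extends the joined prefix incrementally, checks membership in a set built once from command_names, and keeps the longest matching index in a 'best' accumulator.
import Mathlib
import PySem

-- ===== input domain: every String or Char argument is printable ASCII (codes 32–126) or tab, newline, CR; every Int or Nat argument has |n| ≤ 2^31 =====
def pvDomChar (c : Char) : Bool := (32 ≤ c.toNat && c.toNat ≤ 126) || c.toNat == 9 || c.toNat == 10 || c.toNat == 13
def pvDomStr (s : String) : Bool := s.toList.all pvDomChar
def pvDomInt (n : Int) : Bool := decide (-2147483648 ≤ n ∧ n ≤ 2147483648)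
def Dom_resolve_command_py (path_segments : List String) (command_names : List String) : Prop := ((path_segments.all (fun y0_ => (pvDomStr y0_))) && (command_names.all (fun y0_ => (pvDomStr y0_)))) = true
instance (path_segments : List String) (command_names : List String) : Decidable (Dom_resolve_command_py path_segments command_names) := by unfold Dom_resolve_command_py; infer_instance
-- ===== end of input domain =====

-- B replaces A's backward re-join-and-rescan with one forward pass that extends the joined
-- prefix incrementally, tests membership in a set built once, and keeps the longest match
-- in a 'best' accumulator (objective: faster; a timing run measured the speedup).

-- ===== PORT A =====
-- fallback 'return path_segments[0], path_segments[1:]'; on [] Python raises IndexError (excluded by Pre_)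
def pyFallback (path_segments : List String) : Option String × List String :=
  match path_segments with
  | [] => (none, [])
  | h :: t => (some h, t)

-- 'for i in range(len(path_segments), 0, -1): …'
def pyALoop (path_segments : List String) (command_names : List String) :
    List Int → Option String × List String
  | [] => pyFallback path_segments
  | i :: rest =>
    let candidate := PySem.Str.join "/" (PySem.List.slice path_segments none (some i))
    if command_names.contains candidate then
      (some candidate, PySem.List.slice path_segments (some i) none)
    else
      pyALoop path_segments command_names rest

def resolve_command_py (path_segments : List String) (command_names : List String) : Option String × List String :=
  if command_names = [] then (none, path_segments)
  else pyALoop path_segments command_names (PySem.List.pyRange (path_segments.length : Int) 0 (-1))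

-- ===== PORT B =====
-- 'for i, seg in enumerate(path_segments): prefix = seg if i == 0 else prefix + "/" + seg; …'
def pyBLoop (names : PySem.Set String) :
    List String → Nat → String → Option (Nat × String) → Option (Nat × String)
  | [], _, _, best => best
  | seg :: rest, i, pre, best =>
    let pre' := if i = 0 then seg else pre ++ "/" ++ seg
    let best' := if PySem.Set.contains names pre' then some (i + 1, pre') else best
    pyBLoop names rest (i + 1) pre' best'

def resolve_command_py_alt (path_segments : List String) (command_names : List String) : Option String × List String :=
  if command_names = [] then (none, path_segments)
  else
    match pyBLoop (PySem.Set.ofList command_names) path_segments 0 "" none with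
    | some (j, pref) => (some pref, PySem.List.slice path_segments (some (j : Int)) none)
    | none =>
      match path_segments with
      | [] => (none, [])  -- Python raises IndexError here (excluded by Pre_)
      | h :: t => (some h, t)

-- ===== PRECONDITION & SPEC =====
-- Pre_ excludes only the inputs on which BOTH Pythons raise IndexError
-- (empty path_segments with non-empty command_names and no command matching the empty join).
def Pre_resolve_command_py (path_segments : List String) (command_names : List String) : Prop :=
  path_segments ≠ [] ∨ command_names = []
instance (path_segments : List String) (command_names : List String) : Decidable (Pre_resolve_command_py path_segments command_names) := by unfold Pre_resolve_command_py; infer_instance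

def pvWitness_resolve_command_py : List String × List String := (["a", "b"], ["a"])

def Spec_resolve_command_py (path_segments : List String) (command_names : List String) (out : Option String × List String) : Prop := out = resolve_command_py_alt path_segments command_names
instance (path_segments : List String) (command_names : List String) (out : Option String × List String) : Decidable (Spec_resolve_command_py path_segments command_names out) := by unfold Spec_resolve_command_py; infer_instance

-- ===== CLAIM (what is proved, stated in full; the proofs are below) =====
def Claim_equal_resolve_command_py : Prop := ∀ (path_segments : List String) (command_names : List String), Dom_resolve_command_py path_segments command_names → Pre_resolve_command_py path_segments command_names → Spec_resolve_command_py path_segments command_names (resolve_command_py path_segments command_names)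

-- ===== LEMMAS AND PROOFS =====

-- the descending reference recursion both loops reduce to
def refLoop (path_segments : List String) (command_names : List String) : Nat → Option String × List String
  | 0 => pyFallback path_segments
  | k + 1 =>
    let c := PySem.Str.join "/" (path_segments.take (k + 1))
    if command_names.contains c then (some c, path_segments.drop (k + 1))
    else refLoop path_segments command_names k

-- the 'best' value B's forward loop has accumulated after the first k segments
def bestUpTo (path_segments : List String) (command_names : List String) : Nat → Option (Nat × String)
  | 0 => none
  | k + 1 =>
    let c := PySem.Str.join "/" (path_segments.take (k + 1))
    if command_names.contains c then some (k + 1, c)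
    else bestUpTo path_segments command_names k

lemma join_cons2 (x y : String) (l : List String) :
    PySem.Str.join "/" (x :: y :: l) = x ++ "/" ++ PySem.Str.join "/" (y :: l) := by
  apply String.toList_injective
  simp [PySem.Str.toList_join, PySem.Chars.join_cons_cons]

lemma join_snoc (xs : List String) (s : String) (h : xs ≠ []) :
    PySem.Str.join "/" (xs ++ [s]) = PySem.Str.join "/" xs ++ "/" ++ s := by
  induction xs with
  | nil => exact absurd rfl h
  | cons a l ih =>
    cases l with
    | nil =>
      apply String.toList_injective
      simp [PySem.Str.toList_join, PySem.Chars.join_cons_cons, PySem.Chars.join_singleton]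
    | cons b l' =>
      rw [show (a :: b :: l') ++ [s] = a :: b :: (l' ++ [s]) by simp]
      rw [join_cons2, show b :: (l' ++ [s]) = (b :: l') ++ [s] by simp, ih (by simp), join_cons2]
      simp [String.append_assoc]

lemma aLoop_eq_refLoop (path_segments command_names : List String) :
    ∀ n : Nat, pyALoop path_segments command_names (PySem.List.pyRange (n : Int) 0 (-1))
      = refLoop path_segments command_names n := by
  intro n
  induction n with
  | zero =>
    rw [PySem.List.pyRange_neg_one_eq_nil (by omega)]
    rfl
  | succ k ih =>
    rw [show ((k + 1 : Nat) : Int) = (k : Int) + 1 by push_cast; ring]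
    rw [PySem.List.pyRange_neg_one_cons (by omega)]
    show (let candidate := PySem.Str.join "/" (PySem.List.slice path_segments none (some ((k : Int) + 1)));
          if command_names.contains candidate then
            (some candidate, PySem.List.slice path_segments (some ((k : Int) + 1)) none)
          else pyALoop path_segments command_names (PySem.List.pyRange ((k : Int) + 1 - 1) 0 (-1)))
        = refLoop path_segments command_names (k + 1)
    have hc : ((k : Int) + 1) = ((k + 1 : Nat) : Int) := by push_cast; ring
    rw [hc, PySem.List.slice_to_natCast, PySem.List.slice_from_natCast]
    have hr : ((k + 1 : Nat) : Int) - 1 = ((k : Nat) : Int) := by push_cast; ring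
    rw [hr]
    simp only [refLoop, ih]

lemma refLoop_eq_bestUpTo (path_segments command_names : List String) (n : Nat) :
    refLoop path_segments command_names n
      = match bestUpTo path_segments command_names n with
        | some (j, c) => (some c, path_segments.drop j)
        | none => pyFallback path_segments := by
  induction n with
  | zero => rfl
  | succ k ih =>
    simp only [refLoop, bestUpTo]
    split_ifs with h
    · rfl
    · exact ih

lemma contains_ofList (cmds : List String) (s : String) :
    PySem.Set.contains (PySem.Set.ofList cmds) s = cmds.contains s := by
  by_cases h : s ∈ cmds
  · rw [(PySem.Set.contains_iff _ _).2 ((PySem.Set.mem_ofList _ _).2 h)]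
    simp [h]
  · have hni : ¬ s ∈ PySem.Set.ofList cmds := fun hm => h ((PySem.Set.mem_ofList _ _).1 hm)
    have h1 : PySem.Set.contains (PySem.Set.ofList cmds) s = false := by
      cases hc : PySem.Set.contains (PySem.Set.ofList cmds) s
      · rfl
      · exact absurd ((PySem.Set.contains_iff _ _).1 hc) hni
    rw [h1]
    simp [h]

lemma bLoop_eq_bestUpTo (path_segments command_names : List String) :
    ∀ (rest : List String) (k : Nat), rest = path_segments.drop k → k ≤ path_segments.length →
      pyBLoop (PySem.Set.ofList command_names) rest k
        (PySem.Str.join "/" (path_segments.take k)) (bestUpTo path_segments command_names k)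
      = bestUpTo path_segments command_names path_segments.length := by
  intro rest
  induction rest with
  | nil =>
    intro k hdrop hle
    have : path_segments.length ≤ k := by
      by_contra hlt
      have := List.drop_eq_nil_iff.1 hdrop.symm
      omega
    have hk : k = path_segments.length := le_antisymm hle this
    rw [hk]
    rfl
  | cons seg rest ih =>
    intro k hdrop hle
    have hlt : k < path_segments.length := by
      by_contra hge
      rw [List.drop_eq_nil_of_le (by omega)] at hdrop
      simp at hdrop
    have hseg : path_segments[k] = seg := by
      have h := List.getElem?_drop (xs := path_segments) (i := k) (j := 0)
      rw [← hdrop] at h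
      simp [List.getElem?_eq_getElem hlt] at h
      exact h.symm
    have htake : path_segments.take (k + 1) = path_segments.take k ++ [seg] := by
      rw [← hseg]
      exact List.take_succ_eq_append_getElem hlt
    have hpre : (if k = 0 then seg
        else PySem.Str.join "/" (path_segments.take k) ++ "/" ++ seg)
        = PySem.Str.join "/" (path_segments.take (k + 1)) := by
      by_cases hk0 : k = 0
      · subst hk0
        simp only [htake, List.take_zero, List.nil_append]
        apply String.toList_injective
        simp [PySem.Str.toList_join, PySem.Chars.join_singleton]
      · rw [if_neg hk0, htake, join_snoc]
        intro hnil
        have : (path_segments.take k).length = 0 := by rw [hnil]; rfl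
        rw [List.length_take] at this
        omega
    have hrest : rest = path_segments.drop (k + 1) := by
      have h2 : path_segments.drop (k + 1) = (path_segments.drop k).tail := by
        rw [List.tail_drop]
      rw [h2, ← hdrop]
      rfl
    show pyBLoop (PySem.Set.ofList command_names) rest (k + 1)
        (if k = 0 then seg else PySem.Str.join "/" (path_segments.take k) ++ "/" ++ seg)
        (if PySem.Set.contains (PySem.Set.ofList command_names)
            (if k = 0 then seg else PySem.Str.join "/" (path_segments.take k) ++ "/" ++ seg)
         then some (k + 1, (if k = 0 then seg else PySem.Str.join "/" (path_segments.take k) ++ "/" ++ seg))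
         else bestUpTo path_segments command_names k)
      = bestUpTo path_segments command_names path_segments.length
    rw [hpre, contains_ofList]
    have hbest : (if command_names.contains (PySem.Str.join "/" (path_segments.take (k + 1)))
        then some (k + 1, PySem.Str.join "/" (path_segments.take (k + 1)))
        else bestUpTo path_segments command_names k)
        = bestUpTo path_segments command_names (k + 1) := rfl
    rw [hbest]
    exact ih (k + 1) hrest (by omega)

lemma slice_from_eq_drop (path_segments : List String) (j : Nat) :
    PySem.List.slice path_segments (some (j : Int)) none = path_segments.drop j :=
  PySem.List.slice_from_natCast path_segments j

-- ===== VERDICT (by name: the statement is the Claim_ definition above) =====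
theorem resolve_command_py_spec : Claim_equal_resolve_command_py := by
  intro path_segments command_names _hdom _hpre
  unfold Spec_resolve_command_py resolve_command_py resolve_command_py_alt
  by_cases hc : command_names = []
  · simp [hc]
  · rw [if_neg hc, if_neg hc]
    have hb := bLoop_eq_bestUpTo path_segments command_names path_segments 0 rfl (by omega)
    have hb0 : PySem.Str.join "/" (path_segments.take 0) = "" := rfl
    rw [List.take_zero] at hb0
    have hb' : pyBLoop (PySem.Set.ofList command_names) path_segments 0 "" none
        = bestUpTo path_segments command_names path_segments.length := by
      have : bestUpTo path_segments command_names 0 = none := rfl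
      rw [← this, ← hb0]
      simpa using hb
    rw [hb']
    rw [aLoop_eq_refLoop, refLoop_eq_bestUpTo]
    cases hbu : bestUpTo path_segments command_names path_segments.length with
    | none =>
      simp only [pyFallback]
    | some jc =>
      obtain ⟨j, c⟩ := jc
      simp only [slice_from_eq_drop]
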